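-- pv_equiv track=rewrite | github.com/Best-code/MachineLearning | RandomForrestML/NumeroDos/regression.py | ez
-- ===== SOURCE A (Python) =====
-- def ez(listOfStrings):
--     myDict = {}
--     counter=0
--     for word in listOfStrings:
--         if(word not in myDict.keys()):
--             myDict[word]=counter
--             counter+=1
--     return myDict
-- ===== SOURCE B (Python) =====
-- def ez(listOfStrings):
--     # first-occurrence position of each word, via overwrite while scanning in reverse
--     n = len(listOfStrings)
--     first = {}
--     for i, w in enumerate(reversed(listOfStrings)):
--         first[w] = n - 1 - i
--     # rank the unique words by their first-occurrence position
--     return {w: r for r, w in enumerate(sorted(first, key=first.get))}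
-- ===== Notes on version B (the rewrite author's own statement) =====
-- stated objective: alternative
-- what changed: Instead of one pass with a counter and a membership guard, B computes each word's first-occurrence position by overwriting a dict while scanning the list in reverse (no membership test), then sorts the unique words by that position and assigns ranks with enumerate.
import Mathlib
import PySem

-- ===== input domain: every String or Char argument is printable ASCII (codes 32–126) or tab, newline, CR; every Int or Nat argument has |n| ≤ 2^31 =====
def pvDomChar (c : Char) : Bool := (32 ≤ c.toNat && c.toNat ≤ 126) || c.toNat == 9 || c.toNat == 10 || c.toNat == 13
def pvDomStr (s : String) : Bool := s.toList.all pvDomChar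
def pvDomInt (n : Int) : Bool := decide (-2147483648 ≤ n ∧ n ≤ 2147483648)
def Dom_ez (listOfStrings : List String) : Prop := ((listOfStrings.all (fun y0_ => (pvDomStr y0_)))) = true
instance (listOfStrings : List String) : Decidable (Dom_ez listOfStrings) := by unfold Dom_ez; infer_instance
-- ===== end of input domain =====

-- B replaces A's counter-and-membership-guard loop by a different algorithm: first-occurrence
-- positions via reverse-scan dict overwrite, then sort the unique words by position; objective: alternative.

-- ===== PORT A =====
-- one loop iteration: 'if word not in myDict.keys(): myDict[word]=counter; counter+=1'
def ezStep (st : PySem.Dict String Int × Int) (word : String) : PySem.Dict String Int × Int :=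
  if !(st.1.keys.contains word) then (st.1.insert word st.2, st.2 + 1) else st

def ez (listOfStrings : List String) : List (String × Int) :=
  (listOfStrings.foldl ezStep (PySem.Dict.empty, 0)).1.items

-- ===== PORT B =====
-- 'for i, w in enumerate(reversed(listOfStrings)): first[w] = n - 1 - i'
def ezFirst (listOfStrings : List String) : PySem.Dict String Int :=
  (PySem.List.enumerate listOfStrings.reverse 0).foldl
    (fun d p => d.insert p.2 ((listOfStrings.length : Int) - 1 - p.1)) PySem.Dict.empty

-- '{w: r for r, w in enumerate(sorted(first, key=first.get))}'
-- (key=first.get is applied only to keys of first, where .get returns the stored int: getD is exact there)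
def ez_alt (listOfStrings : List String) : List (String × Int) :=
  let first := ezFirst listOfStrings
  (PySem.List.enumerate (PySem.List.sorted first.keys (fun w => first.getD w 0)) 0).map
    (fun p => (p.2, p.1))

-- ===== PRECONDITION & SPEC =====
def Spec_ez (listOfStrings : List String) (out : List (String × Int)) : Prop := out = ez_alt listOfStrings
instance (listOfStrings : List String) (out : List (String × Int)) : Decidable (Spec_ez listOfStrings out) := by unfold Spec_ez; infer_instance

-- ===== CLAIM (what is proved, stated in full; the proofs are below) =====
def Claim_equal_ez : Prop := ∀ (listOfStrings : List String), Dom_ez listOfStrings → Spec_ez listOfStrings (ez listOfStrings)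

-- ===== LEMMAS AND PROOFS =====

-- ---- A side: the loop builds exactly (word, rank) over the ordered dedup of the input ----

theorem ez_keys_mk (u : List String) :
    (PySem.Dict.mk ((PySem.List.enumerate u 0).map (fun p => (p.2, p.1)))).keys = u := by
  simp [PySem.Dict.keys, List.map_map, Function.comp_def, PySem.List.map_snd_enumerate]

-- main invariant: folding A's loop body over xs starting from the dict/counter of a seen
-- list u yields the dict of PySem.Set.update u xs
theorem ez_invariant (xs : List String) (u : List String) :
    (xs.foldl ezStep
        (PySem.Dict.mk ((PySem.List.enumerate u 0).map (fun p => (p.2, p.1))), (u.length : Int))).1.items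
      = (PySem.List.enumerate (PySem.Set.update u xs) 0).map (fun p => (p.2, p.1)) := by
  induction xs generalizing u with
  | nil => simp [PySem.Set.update]
  | cons x xs ih =>
    by_cases hxm : x ∈ u
    · have hex : ∃ a, (a, x) ∈ PySem.List.enumerate u := by
        have hm : x ∈ (PySem.List.enumerate u 0).map (·.2) := by
          rw [PySem.List.map_snd_enumerate]; exact hxm
        obtain ⟨⟨a, b⟩, hp, hpx⟩ := List.mem_map.mp hm
        cases hpx; exact ⟨a, hp⟩
      have hstep : ezStep
          (PySem.Dict.mk ((PySem.List.enumerate u 0).map (fun p => (p.2, p.1))), (u.length : Int)) x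
          = (PySem.Dict.mk ((PySem.List.enumerate u 0).map (fun p => (p.2, p.1))), (u.length : Int)) := by
        simp [ezStep, hex]
      have hadd : PySem.Set.add u x = u := by
        simp [PySem.Set.add, PySem.Set.contains, hxm]
      rw [List.foldl_cons, hstep, ih u]
      simp [PySem.Set.update, hadd]
    · have hnex : ∀ (a : Int) (b : String), (a, b) ∈ PySem.List.enumerate u → ¬ b = x := by
        intro a b hab hbx
        subst hbx
        apply hxm
        have hm : b ∈ (PySem.List.enumerate u 0).map (·.2) := List.mem_map_of_mem hab
        rwa [PySem.List.map_snd_enumerate] at hm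
      have hkeys : (PySem.Dict.mk ((PySem.List.enumerate u 0).map (fun p => (p.2, p.1)))).keys.contains x = false := by
        rw [ez_keys_mk]; simpa using hxm
      have hcontains :
          (PySem.Dict.mk ((PySem.List.enumerate u 0).map (fun p => (p.2, p.1)))).contains x = false := by
        simp only [PySem.Dict.contains]
        simp
        exact hnex
      have hstep : ezStep
          (PySem.Dict.mk ((PySem.List.enumerate u 0).map (fun p => (p.2, p.1))), (u.length : Int)) x
          = (PySem.Dict.mk ((PySem.List.enumerate (u ++ [x]) 0).map (fun p => (p.2, p.1))),
             ((u ++ [x]).length : Int)) := by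
        simp only [ezStep, hkeys, Bool.not_false, if_true, Prod.mk.injEq]
        refine ⟨?_, ?_⟩
        · simp [PySem.Dict.insert, hcontains, PySem.List.enumerate_append,
            PySem.List.enumerate]
        · simp [List.length_append]
      have hadd : PySem.Set.add u x = u ++ [x] := by
        simp [PySem.Set.add, PySem.Set.contains, hxm]
      rw [List.foldl_cons, hstep, ih (u ++ [x])]
      simp [PySem.Set.update, hadd]

theorem ez_eq_canon (l : List String) :
    ez l = (PySem.List.enumerate (PySem.List.dedup l) 0).map (fun p => (p.2, p.1)) := by
  unfold ez
  have h0 := ez_invariant l []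
  simpa [PySem.List.enumerate, PySem.Dict.empty, PySem.List.dedup,
    PySem.Set.ofList_eq_foldl, PySem.Set.update] using h0

-- ---- B side ----

-- the reverse-overwrite fold stores, for every member w, c - (length - 1) + idxOf w
theorem getD_revfold (xs : List String) (c : Int) (w : String) (hw : w ∈ xs) :
    ((PySem.List.enumerate xs.reverse 0).foldl
        (fun d p => d.insert p.2 (c - p.1)) PySem.Dict.empty).getD w 0
      = c - (xs.length : Int) + 1 + (List.idxOf w xs : Int) := by
  induction xs with
  | nil => cases hw
  | cons x xs ih =>
    rw [List.reverse_cons, PySem.List.enumerate_append, List.foldl_append]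
    simp only [PySem.List.enumerate_cons, PySem.List.enumerate_nil, List.length_reverse,
      List.foldl_cons, List.foldl_nil]
    rw [PySem.Dict.getD_insert]
    by_cases hwx : w = x
    · subst hwx
      simp [List.idxOf_cons_self, List.length_cons]
      omega
    · have hw' : w ∈ xs := by
        rcases List.mem_cons.mp hw with h | h
        · exact absurd h hwx
        · exact h
      rw [if_neg hwx, ih hw', List.idxOf_cons_ne _ (fun h => hwx h.symm)]
      simp only [List.length_cons]
      push_cast
      omega

-- keys of the reverse-overwrite fold: the ordered dedup of the reversed list
theorem keys_revfold (xs : List String) (c : Int) :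
    ((PySem.List.enumerate xs.reverse 0).foldl
        (fun d p => d.insert p.2 (c - p.1)) PySem.Dict.empty).keys
      = PySem.Set.ofList xs.reverse := by
  have h := PySem.Dict.keys_foldl_insert_key (PySem.List.enumerate xs.reverse 0)
    (fun p : Int × String => p.2) (fun _ p => c - p.1) (PySem.Dict.empty : PySem.Dict String Int)
  simpa [PySem.List.map_snd_enumerate, PySem.Set.update, PySem.Set.ofList, PySem.Set.empty,
    PySem.Dict.keys_empty] using h

-- the ordered dedup of l lists words in strictly increasing first-occurrence order
theorem pairwise_idxOf_ofList (l : List String) :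
    (PySem.Set.ofList l).Pairwise (fun a b => List.idxOf a l < List.idxOf b l) := by
  induction l using List.reverseRecOn with
  | nil => simp [PySem.Set.ofList, PySem.Set.empty]
  | append_singleton l x ih =>
    have hsplit : PySem.Set.ofList (l ++ [x]) = PySem.Set.add (PySem.Set.ofList l) x := by
      simp [PySem.Set.ofList, List.foldl_append]
    rw [hsplit]
    by_cases hx : x ∈ PySem.Set.ofList l
    · have hadd : PySem.Set.add (PySem.Set.ofList l) x = PySem.Set.ofList l := by
        simp [PySem.Set.add, PySem.Set.contains, hx]
      rw [hadd]
      refine ih.imp_of_mem ?_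
      intro a b ha hb hab
      have ha' : a ∈ l := (PySem.Set.mem_ofList l a).mp ha
      have hb' : b ∈ l := (PySem.Set.mem_ofList l b).mp hb
      rwa [List.idxOf_append, if_pos ha', List.idxOf_append, if_pos hb']
    · have hadd : PySem.Set.add (PySem.Set.ofList l) x = PySem.Set.ofList l ++ [x] := by
        simp [PySem.Set.add, PySem.Set.contains, hx]
      have hxl : x ∉ l := fun h => hx ((PySem.Set.mem_ofList l x).mpr h)
      rw [hadd, List.pairwise_append]
      refine ⟨?_, by simp, ?_⟩
      · refine ih.imp_of_mem ?_
        intro a b ha hb hab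
        have ha' : a ∈ l := (PySem.Set.mem_ofList l a).mp ha
        have hb' : b ∈ l := (PySem.Set.mem_ofList l b).mp hb
        rwa [List.idxOf_append, if_pos ha', List.idxOf_append, if_pos hb']
      · intro a ha b hb
        have ha' : a ∈ l := (PySem.Set.mem_ofList l a).mp ha
        have hb' : b = x := by simpa using hb
        subst hb'
        rw [List.idxOf_append, if_pos ha', List.idxOf_append, if_neg hxl]
        simp [List.idxOf_cons_self]
        exact List.idxOf_lt_length_of_mem ha'

theorem ez_alt_eq_canon (l : List String) :
    ez_alt l = (PySem.List.enumerate (PySem.List.dedup l) 0).map (fun p => (p.2, p.1)) := by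
  unfold ez_alt
  have hkeys : (ezFirst l).keys = PySem.Set.ofList l.reverse := keys_revfold l ((l.length : Int) - 1)
  have hgetD : ∀ w ∈ l, (ezFirst l).getD w 0 = (List.idxOf w l : Int) := by
    intro w hw
    have := getD_revfold l ((l.length : Int) - 1) w hw
    unfold ezFirst
    rw [this]; ring
  have hsorted : PySem.List.sorted (ezFirst l).keys (fun w => (ezFirst l).getD w 0)
      = PySem.List.dedup l := by
    apply PySem.List.sorted_eq_of_perm_of_pairwise_lt
    · rw [hkeys]
      rw [List.perm_ext_iff_of_nodup (PySem.List.nodup_dedup l) (PySem.Set.nodup_ofList _)]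
      intro a
      simp only [PySem.List.mem_dedup, PySem.Set.mem_ofList, List.mem_reverse]
    · have hbase := pairwise_idxOf_ofList l
      have hdedup : PySem.List.dedup l = PySem.Set.ofList l := rfl
      rw [hdedup]
      refine hbase.imp_of_mem ?_
      intro a b ha hb hab
      have ha' : a ∈ l := (PySem.Set.mem_ofList l a).mp ha
      have hb' : b ∈ l := (PySem.Set.mem_ofList l b).mp hb
      rw [hgetD a ha', hgetD b hb']
      exact_mod_cast hab
  simp only [hsorted]

-- ===== VERDICT (by name: the statement is the Claim_ definition above) =====
theorem ez_spec : Claim_equal_ez := by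
  intro l _
  unfold Spec_ez
  rw [ez_eq_canon, ez_alt_eq_canon]
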